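-- pv_equiv track=rewrite | github.com/Madusanka2013-hub/StellaOS | core/voe_scraper.py | select_primary_m3u8
-- ===== SOURCE A (Python) =====
-- def select_primary_m3u8(links):
--     for l in links:
--         if "master.m3u8" in l:
--             return l
--     for l in links:
--         if "index" in l and ".m3u8" in l:
--             return l
--     if links:
--         return links[0]
--     return None
-- ===== SOURCE B (Python) =====
-- def _rank(l):
--     if "master.m3u8" in l:
--         return 0
--     if "index" in l and ".m3u8" in l:
--         return 1
--     return 2
--
-- def select_primary_m3u8(links):
--     return min(links, key=_rank, default=None)
-- ===== Notes on version B (the rewrite author's own statement) =====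
-- stated objective: idiomatic
-- what changed: Replaces A's staged scans and fallback by ranking each link (0 master, 1 index+.m3u8, 2 other) and taking the stable minimum with min(links, key=_rank, default=None), whose first-minimal tie-breaking realises A's priority order.
import Mathlib
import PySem

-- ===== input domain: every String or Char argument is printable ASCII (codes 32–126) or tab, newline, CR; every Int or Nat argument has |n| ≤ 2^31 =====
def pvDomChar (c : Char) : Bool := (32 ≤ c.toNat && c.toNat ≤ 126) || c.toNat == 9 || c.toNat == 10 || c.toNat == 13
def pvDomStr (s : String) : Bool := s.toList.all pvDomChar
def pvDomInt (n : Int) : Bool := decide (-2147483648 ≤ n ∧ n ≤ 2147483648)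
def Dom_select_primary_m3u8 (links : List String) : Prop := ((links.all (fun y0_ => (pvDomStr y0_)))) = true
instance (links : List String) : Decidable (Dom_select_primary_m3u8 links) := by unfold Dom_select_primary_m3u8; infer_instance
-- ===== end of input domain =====

-- B ranks each link (0 master, 1 index+.m3u8, 2 other) and takes the stable minimum; idiomatic re-decomposition, same cost.

-- ===== PORT A =====
-- first loop of A: return l on the first link containing "master.m3u8"
def pvFirstMaster : List String → Option String
  | [] => none
  | l :: rest => if PySem.Str.isIn "master.m3u8" l then some l else pvFirstMaster rest

-- second loop of A: return l on the first link containing "index" and ".m3u8"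
def pvFirstIndex : List String → Option String
  | [] => none
  | l :: rest =>
      if PySem.Str.isIn "index" l && PySem.Str.isIn ".m3u8" l then some l
      else pvFirstIndex rest

def select_primary_m3u8 (links : List String) : Option String :=
  match pvFirstMaster links with
  | some l => some l
  | none =>
    match pvFirstIndex links with
    | some l => some l
    | none =>
      match links with
      | [] => none
      | l :: _ => some l

-- ===== PORT B =====
-- _rank of Source B
def pvRank (l : String) : Int :=
  if PySem.Str.isIn "master.m3u8" l then 0
  else if PySem.Str.isIn "index" l && PySem.Str.isIn ".m3u8" l then 1
  else 2

-- min(links, key=_rank, default=None): PySem.List.min? is Python's min with a key (first minimal element, none on [])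
def select_primary_m3u8_alt (links : List String) : Option String :=
  PySem.List.min? links pvRank

-- ===== PRECONDITION & SPEC =====
def Spec_select_primary_m3u8 (links : List String) (out : Option String) : Prop := out = select_primary_m3u8_alt links
instance (links : List String) (out : Option String) : Decidable (Spec_select_primary_m3u8 links out) := by unfold Spec_select_primary_m3u8; infer_instance

-- ===== CLAIM (what is proved, stated in full; the proofs are below) =====
def Claim_equal_select_primary_m3u8 : Prop := ∀ (links : List String), Dom_select_primary_m3u8 links → Spec_select_primary_m3u8 links (select_primary_m3u8 links)

-- ===== LEMMAS AND PROOFS =====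

-- the fold step of PySem.List.min? at key pvRank, named for the proofs
def pvMinStep (acc : Option String) (x : String) : Option String :=
  match acc with
  | none => some x
  | some m => if pvRank x < pvRank m then some x else some m

theorem pvMinStep_some (m x : String) :
    pvMinStep (some m) x = if pvRank x < pvRank m then some x else some m := rfl

theorem pvMin?_eq_fold (links : List String) :
    PySem.List.min? links pvRank = List.foldl pvMinStep none links := by
  unfold PySem.List.min?
  congr 1
  funext acc x
  cases acc <;> rfl

theorem pvRank_nonneg (l : String) : 0 ≤ pvRank l := by
  unfold pvRank; split_ifs <;> norm_num

theorem pvRank_zero (l : String) (h : PySem.Str.isIn "master.m3u8" l = true) :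
    pvRank l = 0 := by
  unfold pvRank; rw [if_pos h]

theorem pvRank_one (l : String) (hM : ¬ PySem.Str.isIn "master.m3u8" l = true)
    (hI : (PySem.Str.isIn "index" l && PySem.Str.isIn ".m3u8" l) = true) :
    pvRank l = 1 := by
  unfold pvRank; rw [if_neg hM, if_pos hI]

theorem pvRank_two (l : String) (hM : ¬ PySem.Str.isIn "master.m3u8" l = true)
    (hI : ¬ (PySem.Str.isIn "index" l && PySem.Str.isIn ".m3u8" l) = true) :
    pvRank l = 2 := by
  unfold pvRank; rw [if_neg hM, if_neg hI]

theorem pvRank_pos (l : String) (hM : ¬ PySem.Str.isIn "master.m3u8" l = true) :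
    1 ≤ pvRank l := by
  unfold pvRank; rw [if_neg hM]; split_ifs <;> norm_num

-- running minimum from an element of rank 0 never changes
theorem pvFold0 (xs : List String) (m : String) (h : pvRank m = 0) :
    List.foldl pvMinStep (some m) xs = some m := by
  induction xs with
  | nil => rfl
  | cons x t ih =>
      have hx : ¬ pvRank x < pvRank m := by
        rw [h]; exact not_lt.mpr (pvRank_nonneg x)
      rw [List.foldl_cons, pvMinStep_some, if_neg hx, ih]

-- from rank 1: only a master link can displace the accumulator
theorem pvFold1 (xs : List String) (m : String) (h : pvRank m = 1) :
    List.foldl pvMinStep (some m) xs =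
      (match pvFirstMaster xs with
       | some l => some l
       | none => some m) := by
  induction xs with
  | nil => rfl
  | cons x t ih =>
      by_cases hxM : PySem.Str.isIn "master.m3u8" x = true
      · have hx0 : pvRank x = 0 := pvRank_zero x hxM
        have hlt : pvRank x < pvRank m := by rw [hx0, h]; norm_num
        rw [List.foldl_cons, pvMinStep_some, if_pos hlt, pvFold0 t x hx0]
        simp only [pvFirstMaster]
        rw [if_pos hxM]
      · have hx : ¬ pvRank x < pvRank m := by
          rw [h]; exact not_lt.mpr (pvRank_pos x hxM)
        rw [List.foldl_cons, pvMinStep_some, if_neg hx, ih]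
        simp only [pvFirstMaster]
        rw [if_neg hxM]

-- from rank 2: first master wins, else first index link, else the accumulator
theorem pvFold2 (xs : List String) (m : String) (h : pvRank m = 2) :
    List.foldl pvMinStep (some m) xs =
      (match pvFirstMaster xs with
       | some l => some l
       | none =>
         match pvFirstIndex xs with
         | some l => some l
         | none => some m) := by
  induction xs with
  | nil => rfl
  | cons x t ih =>
      by_cases hxM : PySem.Str.isIn "master.m3u8" x = true
      · have hx0 : pvRank x = 0 := pvRank_zero x hxM
        have hlt : pvRank x < pvRank m := by rw [hx0, h]; norm_num
        rw [List.foldl_cons, pvMinStep_some, if_pos hlt, pvFold0 t x hx0]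
        simp only [pvFirstMaster]
        rw [if_pos hxM]
      · by_cases hxI : (PySem.Str.isIn "index" x && PySem.Str.isIn ".m3u8" x) = true
        · have hx1 : pvRank x = 1 := pvRank_one x hxM hxI
          have hlt : pvRank x < pvRank m := by rw [hx1, h]; norm_num
          rw [List.foldl_cons, pvMinStep_some, if_pos hlt, pvFold1 t x hx1]
          simp only [pvFirstMaster, pvFirstIndex]
          rw [if_neg hxM, if_pos hxI]
        · have hx2 : pvRank x = 2 := pvRank_two x hxM hxI
          have hx : ¬ pvRank x < pvRank m := by rw [hx2, h]; norm_num
          rw [List.foldl_cons, pvMinStep_some, if_neg hx, ih]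
          simp only [pvFirstMaster, pvFirstIndex]
          rw [if_neg hxM, if_neg hxI]

-- ===== VERDICT (by name: the statement is the Claim_ definition above) =====
theorem select_primary_m3u8_spec : Claim_equal_select_primary_m3u8 := by
  intro links _
  unfold Spec_select_primary_m3u8 select_primary_m3u8 select_primary_m3u8_alt
  rw [pvMin?_eq_fold]
  cases links with
  | nil => rfl
  | cons l rest =>
      have hstep : List.foldl pvMinStep none (l :: rest)
          = List.foldl pvMinStep (some l) rest := rfl
      rw [hstep]
      by_cases hM : PySem.Str.isIn "master.m3u8" l = true
      · rw [pvFold0 rest l (pvRank_zero l hM)]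
        simp only [pvFirstMaster]
        rw [if_pos hM]
      · by_cases hI : (PySem.Str.isIn "index" l && PySem.Str.isIn ".m3u8" l) = true
        · rw [pvFold1 rest l (pvRank_one l hM hI)]
          simp only [pvFirstMaster, pvFirstIndex]
          rw [if_neg hM, if_pos hI]
        · rw [pvFold2 rest l (pvRank_two l hM hI)]
          simp only [pvFirstMaster, pvFirstIndex]
          rw [if_neg hM, if_neg hI]
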